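-- pv_equiv track=rewrite | github.com/Meraj1312/payloadforge | payloadforge/modules/xss/xss_obfuscation.py | _case_obfuscation
-- ===== SOURCE A (Python) =====
-- def _case_obfuscation(payload: str) -> str:
--     """Mix case to bypass case-sensitive filters"""
--
--     result = ""
--     for i, char in enumerate(payload):
--         if i % 2 == 0:
--             result += char.upper()
--         else:
--             result += char.lower()
--
--     # Common patterns
--     result = result.replace("SCRIPT", "ScRiPt")
--     result = result.replace("ALERT", "AlErT")
--     result = result.replace("ONERROR", "OnErRoR")
--     result = result.replace("ONLOAD", "OnLoAd")
--     result = result.replace("JAVASCRIPT", "JaVaScRiPt")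
--
--     return result
-- ===== SOURCE B (Python) =====
-- def _case_obfuscation(payload: str) -> str:
--     """Mix case to bypass case-sensitive filters"""
--
--     evens = payload[::2].upper()
--     odds = payload[1::2].lower()
--     mixed = "".join(e + o for e, o in zip(evens, odds))
--     if len(odds) < len(evens):
--         mixed += evens[-1]
--
--     mixed = mixed.replace("SCRIPT", "ScRiPt")
--     mixed = mixed.replace("ALERT", "AlErT")
--     mixed = mixed.replace("ONERROR", "OnErRoR")
--     mixed = mixed.replace("ONLOAD", "OnLoAd")
--     mixed = mixed.replace("JAVASCRIPT", "JaVaScRiPt")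
--
--     return mixed
-- ===== Notes on version B (the rewrite author's own statement) =====
-- stated objective: alternative
-- what changed: Replaces the enumerate loop with a parity branch and repeated string concatenation by two bulk slice operations (payload[::2].upper(), payload[1::2].lower()) interleaved with zip plus a trailing odd character, followed by the same five replace calls.
import Mathlib
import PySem

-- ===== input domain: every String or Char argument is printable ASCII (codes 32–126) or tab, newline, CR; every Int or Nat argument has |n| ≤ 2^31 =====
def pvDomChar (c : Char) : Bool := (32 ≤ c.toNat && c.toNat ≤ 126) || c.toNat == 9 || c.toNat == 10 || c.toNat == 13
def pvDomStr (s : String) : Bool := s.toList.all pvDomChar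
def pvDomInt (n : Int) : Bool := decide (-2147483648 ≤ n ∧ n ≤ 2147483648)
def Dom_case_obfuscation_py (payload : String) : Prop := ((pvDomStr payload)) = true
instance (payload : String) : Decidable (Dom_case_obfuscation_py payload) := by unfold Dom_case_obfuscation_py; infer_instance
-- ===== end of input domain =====

-- B replaces A's per-character enumerate loop (parity branch, repeated concatenation) by two bulk
-- slices — payload[::2].upper() and payload[1::2].lower() — interleaved with zip plus the trailing
-- odd character; the five replace calls are unchanged ('alternative' objective).

-- ===== PORT A =====
def case_obfuscation_py (payload : String) : String :=
  let result := (PySem.List.enumerate payload.toList 0).foldl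
      (fun acc p =>
        acc ++ [if PySem.Int.mod p.1 2 = 0 then PySem.Chars.upperChar p.2
                else PySem.Chars.lowerChar p.2]) []
  let r1 := PySem.Chars.replace result "SCRIPT".toList "ScRiPt".toList
  let r2 := PySem.Chars.replace r1 "ALERT".toList "AlErT".toList
  let r3 := PySem.Chars.replace r2 "ONERROR".toList "OnErRoR".toList
  let r4 := PySem.Chars.replace r3 "ONLOAD".toList "OnLoAd".toList
  let r5 := PySem.Chars.replace r4 "JAVASCRIPT".toList "JaVaScRiPt".toList
  String.ofList r5

-- ===== PORT B =====
def case_obfuscation_py_alt (payload : String) : String :=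
  let evens := PySem.Chars.upper ((PySem.List.slice? payload.toList none none 2).getD [])
  let odds := PySem.Chars.lower ((PySem.List.slice? payload.toList (some 1) none 2).getD [])
  let zipped := (evens.zip odds).flatMap (fun p => [p.1, p.2])
  let mixed := if odds.length < evens.length
               then zipped ++ (PySem.List.pyGet? evens (-1)).toList
               else zipped
  let m1 := PySem.Chars.replace mixed "SCRIPT".toList "ScRiPt".toList
  let m2 := PySem.Chars.replace m1 "ALERT".toList "AlErT".toList
  let m3 := PySem.Chars.replace m2 "ONERROR".toList "OnErRoR".toList
  let m4 := PySem.Chars.replace m3 "ONLOAD".toList "OnLoAd".toList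
  let m5 := PySem.Chars.replace m4 "JAVASCRIPT".toList "JaVaScRiPt".toList
  String.ofList m5

-- ===== PRECONDITION & SPEC =====
def Spec_case_obfuscation_py (payload : String) (out : String) : Prop := out = case_obfuscation_py_alt payload
instance (payload : String) (out : String) : Decidable (Spec_case_obfuscation_py payload out) := by unfold Spec_case_obfuscation_py; infer_instance

-- ===== CLAIM (what is proved, stated in full; the proofs are below) =====
def Claim_equal_case_obfuscation_py : Prop := ∀ (payload : String), Dom_case_obfuscation_py payload → Spec_case_obfuscation_py payload (case_obfuscation_py payload)

-- ===== LEMMAS AND PROOFS =====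

-- the alternating-case string both programs build before the replace chain
def pvMix : List Char → List Char
  | [] => []
  | [a] => [PySem.Chars.upperChar a]
  | a :: b :: t => PySem.Chars.upperChar a :: PySem.Chars.lowerChar b :: pvMix t

-- every second element (what payload[::2] keeps)
def pvEvens {α : Type} : List α → List α
  | [] => []
  | [a] => [a]
  | a :: _ :: t => a :: pvEvens t

-- zip_longest-with-empty-fill interleave (proof-side model of B's zip + trailing char)
def pvZLC : List Char → List Char → List Char
  | [], ys => ys
  | x :: xs, [] => x :: xs
  | x :: xs, y :: ys => x :: y :: pvZLC xs ys

lemma pvEvens_cons {α : Type} (x : α) (t : List α) :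
    pvEvens (x :: t) = x :: pvEvens t.tail := by
  cases t <;> simp [pvEvens]

lemma pvEvens_length {α : Type} (xs : List α) :
    (pvEvens xs).length = (xs.length + 1) / 2 := by
  induction xs using pvEvens.induct <;> simp [pvEvens, *] <;> omega

-- A's loop, started at an even index, appends pvMix
lemma loopA : ∀ (s : List Char) (n : Nat) (acc : List Char),
    (PySem.List.enumerate s (2 * (n : Int))).foldl
      (fun acc p =>
        acc ++ [if PySem.Int.mod p.1 2 = 0 then PySem.Chars.upperChar p.2
                else PySem.Chars.lowerChar p.2]) acc
    = acc ++ pvMix s := by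
  intro s
  induction s using pvMix.induct with
  | case1 => intro n acc; simp [PySem.List.enumerate, pvMix]
  | case2 a =>
      intro n acc
      have h0 : PySem.Int.mod (2 * (n : Int)) 2 = 0 := by
        rw [PySem.Int.mod_eq_emod_of_pos (by norm_num : (0:Int) < 2)]; omega
      simp [PySem.List.enumerate, pvMix]
  | case3 a b t ih =>
      intro n acc
      have h0 : PySem.Int.mod (2 * (n : Int)) 2 = 0 := by
        rw [PySem.Int.mod_eq_emod_of_pos (by norm_num : (0:Int) < 2)]; omega
      have h1 : PySem.Int.mod (2 * (n : Int) + 1) 2 ≠ 0 := by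
        rw [PySem.Int.mod_eq_emod_of_pos (by norm_num : (0:Int) < 2)]; omega
      have h2 : (2 * (n : Int) + 1 + 1) = 2 * ((n + 1 : Nat) : Int) := by push_cast; ring
      simp only [PySem.List.enumerate, List.foldl_cons, h0, h1, h2, if_true, if_false]
      rw [ih (n + 1)]
      simp [pvMix]

lemma filterMap_evens {α : Type} : ∀ (xs : List α),
    List.filterMap (fun k => xs[2 * k]?) (List.range ((xs.length + 1) / 2)) = pvEvens xs := by
  intro xs
  induction xs using pvEvens.induct with
  | case1 => simp [pvEvens]
  | case2 a => simp [pvEvens]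
  | case3 a b t ih =>
      have hc : ((a :: b :: t).length + 1) / 2 = (t.length + 1) / 2 + 1 := by
        simp; omega
      rw [hc, List.range_succ_eq_map, List.filterMap_cons, List.filterMap_map]
      have he : ∀ k : Nat, (a :: b :: t)[2 * Nat.succ k]? = t[2 * k]? := by
        intro k
        have : 2 * Nat.succ k = 2 * k + 1 + 1 := by omega
        simp [this]
      simp only [Function.comp_def, he]
      simp [pvEvens, ih]

lemma slice2 {α : Type} (xs : List α) :
    PySem.List.slice? xs none none 2 = some (pvEvens xs) := by
  simp only [PySem.List.slice?, PySem.List.sliceIndices]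
  norm_num
  have hc : (if 0 < xs.length then (((xs.length : Int) + 2 - 1) / 2).toNat else 0)
      = (xs.length + 1) / 2 := by
    split_ifs <;> omega
  rw [hc]
  have he : ∀ k : Nat, xs[((2 : Int) * (k : Int)).toNat]? = xs[2 * k]? := by
    intro k; congr 1
  exact (List.filterMap_congr (fun k _ => he k)).trans (filterMap_evens xs)

lemma slice2odd {α : Type} (xs : List α) :
    PySem.List.slice? xs (some 1) none 2 = some (pvEvens xs.tail) := by
  cases xs with
  | nil => simp [PySem.List.slice?, PySem.List.sliceIndices, pvEvens]
  | cons x t =>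
      simp only [PySem.List.slice?, PySem.List.sliceIndices]
      norm_num
      have hc : (if 0 < t.length then (((t.length : Int) + 2 - 1) / 2).toNat else 0)
          = (t.length + 1) / 2 := by
        split_ifs <;> omega
      rw [hc]
      have he : ∀ k : Nat, (x :: t)[((1 : Int) + 2 * (k : Int)).toNat]? = t[2 * k]? := by
        intro k
        have h1 : ((1 : Int) + 2 * (k : Int)).toNat = 2 * k + 1 := by omega
        rw [h1]; simp
      exact (List.filterMap_congr (fun k _ => he k)).trans (filterMap_evens t)

-- B's zip + trailing character is the zip_longest interleave, given the slice length relation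
lemma zl_spec : ∀ (ev od : List Char), od.length ≤ ev.length → ev.length ≤ od.length + 1 →
    (if od.length < ev.length
     then ((ev.zip od).flatMap (fun p => [p.1, p.2])) ++ (PySem.List.pyGet? ev (-1)).toList
     else (ev.zip od).flatMap (fun p => [p.1, p.2])) = pvZLC ev od := by
  intro ev
  induction ev with
  | nil =>
      intro od h1 _
      have hod : od = [] := by simpa using h1
      subst hod; simp [pvZLC]
  | cons x xs ih =>
      intro od h1 h2
      cases od with
      | nil =>
          have hxs : xs = [] := by simpa using h2
          subst hxs
          simp [pvZLC, PySem.List.pyGet?_neg_one]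
      | cons y ys =>
          have h1' : ys.length ≤ xs.length := by simpa using h1
          have h2' : xs.length ≤ ys.length + 1 := by simpa using h2
          have hin := ih ys h1' h2'
          simp only [List.length_cons, Nat.add_lt_add_iff_right]
          by_cases h : ys.length < xs.length
          · have hxs : xs ≠ [] := List.ne_nil_of_length_pos (by omega)
            rw [if_pos h] at hin
            rw [if_pos h]
            rw [PySem.List.pyGet?_neg_one] at hin ⊢
            have hlast : (x :: xs).getLast? = xs.getLast? := by
              cases xs with
              | nil => exact absurd rfl hxs
              | cons a l => simp [List.getLast?_cons]
            simp only [List.zip_cons_cons, List.flatMap_cons, hlast, pvZLC]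
            rw [← hin]; simp
          · rw [if_neg h] at hin
            rw [if_neg h]
            simp only [List.zip_cons_cons, List.flatMap_cons, pvZLC]
            rw [← hin]; simp

lemma zlc_mix : ∀ (s : List Char),
    pvZLC (List.map PySem.Chars.upperChar (pvEvens s))
          (List.map PySem.Chars.lowerChar (pvEvens s.tail)) = pvMix s := by
  intro s
  induction s using pvMix.induct with
  | case1 => simp [pvEvens, pvZLC, pvMix]
  | case2 a => simp [pvEvens, pvZLC, pvMix]
  | case3 a b t ih =>
      have h1 : pvEvens (a :: b :: t) = a :: pvEvens t := by simp [pvEvens]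
      have h2 : pvEvens (b :: t) = b :: pvEvens t.tail := pvEvens_cons b t
      simp only [List.tail_cons, h1, h2, List.map_cons, pvZLC, pvMix]
      rw [ih]

lemma mix_lengths (s : List Char) :
    (pvEvens s.tail).length ≤ (pvEvens s).length ∧
    (pvEvens s).length ≤ (pvEvens s.tail).length + 1 := by
  cases s with
  | nil => simp [pvEvens]
  | cons x t => rw [List.tail_cons, pvEvens_length, pvEvens_length]; simp; omega

-- ===== VERDICT (by name: the statement is the Claim_ definition above) =====
theorem case_obfuscation_py_spec : Claim_equal_case_obfuscation_py := by
  intro payload _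
  unfold Spec_case_obfuscation_py case_obfuscation_py case_obfuscation_py_alt
  have hA : (PySem.List.enumerate payload.toList 0).foldl
      (fun acc p =>
        acc ++ [if PySem.Int.mod p.1 2 = 0 then PySem.Chars.upperChar p.2
                else PySem.Chars.lowerChar p.2]) []
      = pvMix payload.toList := by
    have := loopA payload.toList 0 []
    simpa using this
  rw [hA, slice2, slice2odd]
  simp only [Option.getD_some, PySem.Chars.upper, PySem.Chars.lower]
  rw [zl_spec _ _ (by simpa using (mix_lengths payload.toList).1)
        (by simpa using (mix_lengths payload.toList).2), zlc_mix]
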